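-- pv_equiv track=rewrite | github.com/gamminghobbit/TTG-public | level.py | loadLevel
-- ===== SOURCE A (Python) =====
-- def loadLevel(level):
--     scale_factor = 48
--     platforms = []
--     for row_idx, row in enumerate(level):
--         started_x = None
--         a_count = 0
--         for col_idx, cell in enumerate(row):
--             if cell == 'A':
--                 # x, y, width, height
--                 a_count += 1
--                 if started_x == None:
--                     started_x = col_idx
--             else:
--                 if a_count != 0:
--                     platforms.append({
--                         'x': scale_factor * started_x,
--                         'y': scale_factor * row_idx,
--                         'width': scale_factor * a_count,
--                         'height': scale_factor,
--                     })
--                     a_count = 0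
--                     started_x = None
--
--         #         if x == None:
--         #             x = scale_factor * col_idx
--         #             y = scale_factor * row_idx
--         #         width += scale_factor
--         # platforms.append({
--         #     'x': scale_factor * col_idx,
--         #     'y': scale_factor * row_idx,
--         #     'width': scale_factor,
--         #     'height': scale_factor,
--         # })
--
--
--     return platforms
-- ===== SOURCE B (Python) =====
-- def loadLevel(level):
--     platforms = []
--     for row_idx, row in enumerate(level):
--         n = len(row)
--         i = 0
--         while i < n:
--             if row[i] != 'A':
--                 i += 1
--                 continue
--             j = i
--             while j < n and row[j] == 'A':
--                 j += 1
--             if j < n:  # a run reaching the end of the row is never emitted (matches A)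
--                 platforms.append({'x': 48 * i, 'y': 48 * row_idx,
--                                   'width': 48 * (j - i), 'height': 48})
--             i = j
--     return platforms
-- ===== Notes on version B (the rewrite author's own statement) =====
-- stated objective: alternative
-- what changed: Replaces A's per-cell state machine (started_x/a_count flags reset on each non-'A' cell) with an index-jumping run scanner that locates each maximal 'A' run in one jump and emits its rectangle directly, keeping A's behaviour that a run touching the end of a row is not emitted.
import Mathlib
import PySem

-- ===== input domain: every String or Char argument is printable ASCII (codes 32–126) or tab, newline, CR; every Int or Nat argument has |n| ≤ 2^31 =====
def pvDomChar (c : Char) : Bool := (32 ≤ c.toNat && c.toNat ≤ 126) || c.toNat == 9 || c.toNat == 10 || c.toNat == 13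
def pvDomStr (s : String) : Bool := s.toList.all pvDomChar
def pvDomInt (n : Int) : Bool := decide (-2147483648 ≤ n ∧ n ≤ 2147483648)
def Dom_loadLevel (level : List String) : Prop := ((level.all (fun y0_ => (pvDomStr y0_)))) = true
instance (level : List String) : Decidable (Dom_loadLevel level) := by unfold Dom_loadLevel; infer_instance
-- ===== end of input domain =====

-- B replaces A's per-cell started_x/a_count state machine with an index-jumping maximal-run
-- scanner (objective: alternative decomposition, same cost); runs touching the row end are
-- not emitted, exactly as in A.

-- ===== PORT A =====
-- inner fold state: (platforms so far, started_x, a_count)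
def pvStepA (scale rowIdx : Int)
    (st : List (List (String × Int)) × Option Int × Int) (q : Int × Char) :
    List (List (String × Int)) × Option Int × Int :=
  if q.2 = 'A' then
    (st.1, (if st.2.1 = none then some q.1 else st.2.1), st.2.2 + 1)
  else
    if st.2.2 ≠ 0 then
      (st.1 ++ [[("x", scale * st.2.1.getD 0), ("y", scale * rowIdx),
                 ("width", scale * st.2.2), ("height", scale)]], none, 0)
    else st

def loadLevel (level : List String) : List (List (String × Int)) :=
  let scale : Int := 48
  (PySem.List.enumerate level).foldl
    (fun platforms p =>
      ((PySem.List.enumerate p.2.toList).foldl (pvStepA scale p.1) (platforms, none, 0)).1)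
    []

-- ===== PORT B =====
-- index-jumping run scanner over one row (= Source B's while loop; the inner
-- 'while j < n and row[j] == A' is the takeWhile, i jumping to j is the dropWhile)
def pvScanRowB (rowIdx n : Int) : List Char → Int → List (List (String × Int))
  | [], _ => []
  | c :: rest, col =>
    if c ≠ 'A' then pvScanRowB rowIdx n rest (col + 1)
    else
      let len : Int := (rest.takeWhile (· = 'A')).length + 1
      (if col + len < n then
        [[("x", 48 * col), ("y", 48 * rowIdx), ("width", 48 * len), ("height", 48)]]
       else []) ++ pvScanRowB rowIdx n (rest.dropWhile (· = 'A')) (col + len)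
termination_by cs _ => cs.length
decreasing_by
  all_goals
    (have := List.length_dropWhile_le (p := fun c => decide (c = 'A')) (l := rest)
     simp at this ⊢ <;> omega)

def loadLevel_alt (level : List String) : List (List (String × Int)) :=
  (PySem.List.enumerate level).foldl
    (fun acc p => acc ++ pvScanRowB p.1 (p.2.toList.length : Int) p.2.toList 0) []

-- ===== PRECONDITION & SPEC =====
def Spec_loadLevel (level : List String) (out : List (List (String × Int))) : Prop := out = loadLevel_alt level
instance (level : List String) (out : List (List (String × Int))) : Decidable (Spec_loadLevel level out) := by unfold Spec_loadLevel; infer_instance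

-- ===== CLAIM (what is proved, stated in full; the proofs are below) =====
def Claim_equal_loadLevel : Prop := ∀ (level : List String), Dom_loadLevel level → Spec_loadLevel level (loadLevel level)

-- ===== LEMMAS AND PROOFS =====

-- the head surviving a dropWhile fails the predicate
theorem pvDropWhileHead {p : Char → Bool} {l : List Char} {d : Char} {ds : List Char}
    (h : l.dropWhile p = d :: ds) : p d = false := by
  induction l with
  | nil => simp at h
  | cons a t ih =>
    rw [List.dropWhile_cons] at h
    split at h
    · exact ih h
    · next hp => cases h; simpa using hp

-- folding A's step over an all-'A' run only bumps the counter
theorem pvRunLemma (scale ri : Int) (run : List Char) (hrun : ∀ c ∈ run, c = 'A') :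
    ∀ (col s ac : Int) (P : List (List (String × Int))),
      (PySem.List.enumerate run col).foldl (pvStepA scale ri) (P, some s, ac)
        = (P, some s, ac + run.length) := by
  induction run with
  | nil => intro col s ac P; simp [PySem.List.enumerate_nil]
  | cons c rest ih =>
    intro col s ac P
    have hc : c = 'A' := hrun c (by simp)
    rw [PySem.List.enumerate_cons, List.foldl_cons]
    have : pvStepA scale ri (P, some s, ac) (col, c) = (P, some s, ac + 1) := by
      simp [pvStepA, hc]
    rw [this, ih (fun c hm => hrun c (by simp [hm]))]
    simp; omega

-- the per-row equivalence, generalized over the start column and accumulator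
theorem pvRowLemma (ri n : Int) (cs : List Char) :
    ∀ (col : Int) (P : List (List (String × Int))), col + cs.length = n →
      ((PySem.List.enumerate cs col).foldl (pvStepA 48 ri) (P, none, 0)).1
        = P ++ pvScanRowB ri n cs col := by
  match cs with
  | [] =>
    intro col P h
    simp [PySem.List.enumerate_nil, pvScanRowB]
  | c :: rest =>
    intro col P h
    rw [PySem.List.enumerate_cons, List.foldl_cons]
    by_cases hc : c = 'A'
    · -- split rest into the remaining 'A'-run and its tail
      have hsplit : rest = rest.takeWhile (· = 'A') ++ rest.dropWhile (· = 'A') :=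
        (List.takeWhile_append_dropWhile).symm
      set run := rest.takeWhile (· = 'A') with hrundef
      set tail := rest.dropWhile (· = 'A') with htaildef
      have hrunA : ∀ x ∈ run, x = 'A' := by
        intro x hx
        have := List.mem_takeWhile_imp hx
        simpa using this
      have hstep : pvStepA 48 ri (P, none, 0) (col, c) = (P, some col, 1) := by
        simp [pvStepA, hc]
      have hen : PySem.List.enumerate rest (col + 1)
          = PySem.List.enumerate run (col + 1) ++ PySem.List.enumerate tail ((col + 1) + run.length) := by
        conv_lhs => rw [hsplit]
        rw [PySem.List.enumerate_append]
      rw [hstep, hen, List.foldl_append, pvRunLemma 48 ri run hrunA]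
      -- unfold B one step on this shape
      have hB : pvScanRowB ri n (c :: rest) col =
          (if col + ((run.length : Int) + 1) < n then
            [[("x", 48 * col), ("y", 48 * ri), ("width", 48 * ((run.length : Int) + 1)), ("height", (48:Int))]]
           else []) ++ pvScanRowB ri n tail (col + ((run.length : Int) + 1)) := by
        rw [pvScanRowB]
        simp [hc, ← hrundef, ← htaildef]
      rw [hB]
      have hrt : rest.length = run.length + tail.length := by
        conv_lhs => rw [hsplit]
        simp
      have hlen2 : col + (1 + (run.length : Int)) + tail.length = n := by
        simp [List.length_cons] at h
        omega
      match htl : tail with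
      | [] =>
        -- run reaches the end of the row: A leaves the counter pending, B emits nothing
        have hfalse : ¬ col + ((run.length : Int) + 1) < n := by
          simp at hlen2; omega
        simp [PySem.List.enumerate_nil, pvScanRowB, hfalse]
      | d :: ds =>
        have hd : (d = 'A') = False := by
          have := pvDropWhileHead htaildef.symm
          simpa using this
        have htrue : col + ((run.length : Int) + 1) < n := by
          simp [List.length_cons] at hlen2; omega
        rw [PySem.List.enumerate_cons, List.foldl_cons]
        have hstep2 : pvStepA 48 ri (P, some col, 1 + (run.length : Int)) (col + 1 + (run.length : Int), d)
            = (P ++ [[("x", (48:Int) * col), ("y", 48 * ri), ("width", 48 * (1 + (run.length : Int))), ("height", 48)]], none, 0) := by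
          have hne : (1 + (run.length : Int)) ≠ 0 := by positivity
          simp [pvStepA, hd, hne]
        have hlt : ds.length < rest.length + 1 := by
          have h1 : (d :: ds).length ≤ rest.length := by
            rw [htaildef]; exact List.length_dropWhile_le _ _
          simp at h1; omega
        rw [hstep2,
            pvRowLemma ri n ds (col + 1 + (run.length : Int) + 1)
              (P ++ [[("x", (48:Int) * col), ("y", 48 * ri), ("width", 48 * (1 + (run.length : Int))), ("height", 48)]])
              (by simp [List.length_cons] at hlen2; omega)]
        -- unfold B one more step over the non-'A' cell d
        rw [pvScanRowB]
        have e1 : col + ((run.length : Int) + 1) + 1 = col + 1 + (run.length : Int) + 1 := by ring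
        have e2 : (1 : Int) + (run.length : Int) = (run.length : Int) + 1 := by ring
        simp [hd, htrue, e1, e2]
    · -- non-'A' head with a fresh state: both sides just move on
      have hstep : pvStepA 48 ri (P, none, 0) (col, c) = (P, none, 0) := by
        simp [pvStepA, hc]
      rw [hstep, pvRowLemma ri n rest (col + 1) P (by simp at h ⊢; omega)]
      rw [pvScanRowB]
      simp [hc]
termination_by cs.length
decreasing_by
  all_goals simp <;> omega

-- the outer folds agree, given the per-row lemma
theorem pvOuterLemma : ∀ (l : List (Int × String)) (acc : List (List (String × Int))),
    l.foldl (fun platforms p =>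
        ((PySem.List.enumerate p.2.toList).foldl (pvStepA 48 p.1) (platforms, none, 0)).1) acc
      = l.foldl (fun acc p => acc ++ pvScanRowB p.1 (p.2.toList.length : Int) p.2.toList 0) acc := by
  intro l
  induction l with
  | nil => intro acc; rfl
  | cons p t ih =>
    intro acc
    simp only [List.foldl_cons]
    rw [pvRowLemma p.1 (p.2.toList.length : Int) p.2.toList 0 acc (by simp), ih]

-- ===== VERDICT (by name: the statement is the Claim_ definition above) =====
theorem loadLevel_spec : Claim_equal_loadLevel := by
  unfold Claim_equal_loadLevel
  intro level _
  unfold Spec_loadLevel loadLevel loadLevel_alt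
  simp only []
  exact pvOuterLemma (PySem.List.enumerate level) []
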